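-- pv_equiv track=rewrite | github.com/crohan99/aoc2023 | d1/d1.py | get_words_info
-- ===== SOURCE A (Python) =====
-- digitWords = {'one': '1', 'two': '2', 'three': '3', 'four': '4', 'five': '5', 'six': '6', 'seven': '7',
--               'eight': '8', 'nine': '9'}
--
-- def get_next_indices(lst, target_value):
--     indices = []
--     current_index = -1
--
--     while True:
--         try:
--             current_index = lst.index(target_value, current_index + 1)
--             indices.append(current_index)
--         except ValueError:
--             break
--
--     return indices
--
-- def get_words_info(calibrationValue):
--     locations = {}
--
--     for key, value in digitWords.items():
--
--         if key in calibrationValue: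
--
--             indices = get_next_indices(calibrationValue, key)
--
--             for index in indices:
--                 locations.update({index: value})
--
--     return locations
-- ===== SOURCE B (Python) =====
-- digitWords = {'one': '1', 'two': '2', 'three': '3', 'four': '4', 'five': '5', 'six': '6', 'seven': '7',
--               'eight': '8', 'nine': '9'}
--
-- def get_words_info(calibrationValue):
--     return {i: value
--             for word, value in digitWords.items()
--             for i in range(len(calibrationValue))
--             if calibrationValue.startswith(word, i)}
-- ===== Notes on version B (the rewrite author's own statement) =====
-- stated objective: simpler
-- what changed: A scans word by word with repeated str.index calls inside a try/except helper and updates a dict per occurrence; B is a single dict comprehension that checks startswith(word, i) at every position, with no helper and no exception handling.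
import Mathlib
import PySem

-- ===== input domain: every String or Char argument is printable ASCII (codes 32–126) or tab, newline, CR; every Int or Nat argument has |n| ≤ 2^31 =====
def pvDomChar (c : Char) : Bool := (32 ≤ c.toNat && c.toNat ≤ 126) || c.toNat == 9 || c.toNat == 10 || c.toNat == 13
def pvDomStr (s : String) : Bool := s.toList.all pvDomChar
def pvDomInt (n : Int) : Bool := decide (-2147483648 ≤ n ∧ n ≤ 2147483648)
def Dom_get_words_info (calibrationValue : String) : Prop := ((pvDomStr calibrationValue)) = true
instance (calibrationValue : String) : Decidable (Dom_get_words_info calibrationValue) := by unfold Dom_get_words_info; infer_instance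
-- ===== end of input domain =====

-- B replaces the word-by-word repeated str.index scanning (with try/except) by a single
-- dict comprehension over words and positions using startswith — simpler, same cost.

-- ===== PORT A =====
def pvDigitWords : List (String × String) :=
  [("one","1"),("two","2"),("three","3"),("four","4"),("five","5"),
   ("six","6"),("seven","7"),("eight","8"),("nine","9")]

-- bounds of str.find(sub, start) when it succeeds (used by the port's termination proof)
theorem pvFindFrom_bounds (cs sub : List Char) (k : Nat)
    (h : PySem.Chars.findFrom cs sub (k : Int) none ≠ -1) :
    k ≤ (PySem.Chars.findFrom cs sub (k : Int) none).toNat ∧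
      (PySem.Chars.findFrom cs sub (k : Int) none).toNat ≤ cs.length := by
  by_cases hk : k ≤ cs.length
  · rw [PySem.Chars.findFrom_natCast cs sub k hk] at h ⊢
    split at h
    · simp at h
    · rename_i hne
      have h1 : -1 ≤ PySem.Chars.find (List.drop k cs) sub := PySem.Chars.neg_one_le_find _ _
      have h2 : PySem.Chars.find (List.drop k cs) sub ≤ (List.drop k cs).length :=
        PySem.Chars.find_le_length _ _
      simp only [List.length_drop] at h2
      split
      · omega
      · omega
  · exfalso; apply h
    simp only [PySem.Chars.findFrom]
    have hlt : ((cs.length : Int)) < (k : Int) := by exact_mod_cast Nat.lt_of_not_le hk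
    have h0 : ¬ ((k:Int) < 0) := by omega
    simp [h0, hlt]

-- port of get_next_indices' while-loop: repeatedly lst.index(target, current+1); ValueError (find = -1) breaks
def pvGetNextIndicesAux (cs sub : List Char) (start : Nat) : List Int :=
  let j := PySem.Chars.findFrom cs sub (start : Int) none
  if h : j = -1 then []
  else j :: pvGetNextIndicesAux cs sub (j.toNat + 1)
termination_by cs.length + 1 - start
decreasing_by
  have := pvFindFrom_bounds cs sub start h
  omega

def get_next_indices (lst : List Char) (target_value : List Char) : List Int :=
  pvGetNextIndicesAux lst target_value 0

def get_words_info (calibrationValue : String) : List (Int × String) :=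
  (pvDigitWords.foldl
    (fun locations kv =>
      if PySem.Chars.isIn kv.1.toList calibrationValue.toList then
        (get_next_indices calibrationValue.toList kv.1.toList).foldl
          (fun loc index => PySem.Dict.insert loc index kv.2) locations
      else locations)
    (PySem.Dict.empty : PySem.Dict Int String)).items

def get_words_info_alt (calibrationValue : String) : List (Int × String) :=
  (pvDigitWords.foldl
    (fun d wv =>
      (List.range calibrationValue.toList.length).foldl
        (fun d i =>
          if PySem.Chars.startswith (calibrationValue.toList.drop i) wv.1.toList then
            PySem.Dict.insert d (i : Int) wv.2
          else d)
        d)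
    (PySem.Dict.empty : PySem.Dict Int String)).items


-- ===== PRECONDITION & SPEC =====
def Spec_get_words_info (calibrationValue : String) (out : List (Int × String)) : Prop := out = get_words_info_alt calibrationValue
instance (calibrationValue : String) (out : List (Int × String)) : Decidable (Spec_get_words_info calibrationValue out) := by unfold Spec_get_words_info; infer_instance

-- ===== CLAIM (what is proved, stated in full; the proofs are below) =====
def Claim_equal_get_words_info : Prop := ∀ (calibrationValue : String), Dom_get_words_info calibrationValue → Spec_get_words_info calibrationValue (get_words_info calibrationValue)

-- ===== LEMMAS AND PROOFS =====
theorem pvAux_eq (cs sub : List Char) (hsub : sub ≠ []) (start : Nat) :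
    pvGetNextIndicesAux cs sub start =
      ((List.range' start (cs.length - start)).filter
        (fun i => PySem.Chars.startswith (cs.drop i) sub)).map (fun i => Int.ofNat i) := by
  fun_induction pvGetNextIndicesAux cs sub start with
  | case1 start j hj =>
    by_cases hle : start ≤ cs.length
    · have hfil : (List.range' start (cs.length - start)).filter
          (fun i => PySem.Chars.startswith (cs.drop i) sub) = [] := by
        rw [List.filter_eq_nil_iff]
        intro i hi hsw
        have hmem := List.mem_range'_1.mp hi
        have hpre : sub <+: cs.drop i := (PySem.Chars.startswith_iff _ _).mp hsw
        have hinf : PySem.Chars.isIn sub (cs.drop start) = true := by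
          rw [← PySem.Chars.exists_prefix_drop_iff_isIn]
          exact ⟨i - start, by rw [List.drop_drop, Nat.add_sub_cancel' hmem.1]; exact hpre⟩
        have hno := (PySem.Chars.findFrom_natCast_eq_neg_one_iff cs sub start hle).mp hj
        rw [← PySem.Chars.isIn_iff_infix] at hno
        exact absurd hinf (by simp [hno])
      rw [hfil, List.map_nil]
    · rw [Nat.sub_eq_zero_of_le (by omega), List.range'_zero, List.filter_nil, List.map_nil]
  | case2 start j hj ih =>
    have hb := pvFindFrom_bounds cs sub start hj
    have hle : start ≤ cs.length := by omega
    obtain ⟨hkj, hpre, hnone⟩ := PySem.Chars.findFrom_natCast_spec cs sub start hle hj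
    set m := (PySem.Chars.findFrom cs sub (start : Int) none).toNat with hm
    have hmlt : m < cs.length := by
      rcases Nat.lt_or_ge m cs.length with h | h
      · exact h
      · exfalso
        have hdrop : cs.drop m = [] := List.drop_eq_nil_of_le h
        rw [hdrop, List.prefix_nil] at hpre
        exact hsub hpre
    have hsplit : cs.length - start = (m - start) + (cs.length - m) := by omega
    rw [hsplit, ← List.range'_append (s := start) (m := m - start) (n := cs.length - m) (step := 1)]
    have hs1 : start + 1 * (m - start) = m := by omega
    rw [hs1, List.filter_append]
    have hfil1 : (List.range' start (m - start)).filter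
        (fun i => PySem.Chars.startswith (cs.drop i) sub) = [] := by
      rw [List.filter_eq_nil_iff]
      intro i hi hsw
      have hmem := List.mem_range'_1.mp hi
      rw [PySem.Chars.startswith_iff] at hsw
      exact hnone i hmem.1 (by omega) hsw
    have hsucc : cs.length - m = (cs.length - (m + 1)) + 1 := by omega
    have hcons : List.range' m (cs.length - m) = m :: List.range' (m + 1) (cs.length - (m + 1)) := by
      rw [hsucc]; rfl
    rw [hfil1, hcons]
    simp only [List.nil_append, List.filter_cons]
    rw [if_pos ((PySem.Chars.startswith_iff _ _).mpr hpre)]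
    simp only [List.map_cons]
    rw [ih]
    congr 1
    simp only [Int.ofNat_eq_natCast]
    omega

theorem pvStep_eq (cs sub : List Char) (v : String) (hsub : sub ≠ []) (d : PySem.Dict Int String) :
    (if PySem.Chars.isIn sub cs then
       (get_next_indices cs sub).foldl (fun loc index => PySem.Dict.insert loc index v) d
     else d)
    = (List.range cs.length).foldl
        (fun d i => if PySem.Chars.startswith (cs.drop i) sub then
            PySem.Dict.insert d (i : Int) v else d) d := by
  rw [← List.foldl_filter (p := fun i => PySem.Chars.startswith (cs.drop i) sub)
        (f := fun d i => PySem.Dict.insert d (i : Int) v)]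
  by_cases hin : PySem.Chars.isIn sub cs
  · rw [if_pos hin]
    unfold get_next_indices
    rw [pvAux_eq cs sub hsub 0, List.foldl_map]
    rw [List.range_eq_range', Nat.sub_zero] at *
    rfl
  · rw [if_neg hin]
    have hfil : (List.range cs.length).filter
        (fun i => PySem.Chars.startswith (cs.drop i) sub) = [] := by
      rw [List.filter_eq_nil_iff]
      intro i hi hsw
      rw [PySem.Chars.startswith_iff] at hsw
      have : PySem.Chars.isIn sub cs = true :=
        (PySem.Chars.exists_prefix_drop_iff_isIn sub cs).mp ⟨i, hsw⟩
      exact hin this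
    rw [hfil, List.foldl_nil]

theorem pv_main (calibrationValue : String) :
    get_words_info calibrationValue = get_words_info_alt calibrationValue := by
  unfold get_words_info get_words_info_alt
  congr 1
  apply PySem.List.foldl_congr_mem
  intro acc kv hkv
  have hne : kv.1.toList ≠ [] := by
    fin_cases hkv <;> decide
  exact pvStep_eq calibrationValue.toList kv.1.toList kv.2 hne acc

-- ===== VERDICT (by name: the statement is the Claim_ definition above) =====
theorem get_words_info_spec : Claim_equal_get_words_info := by
  intro calibrationValue _
  unfold Spec_get_words_info
  exact pv_main calibrationValue
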